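-- pv_equiv track=rewrite | github.com/thyyt/aoc | 2020/day_6/solution.py | parse_paragraphs
-- ===== SOURCE A (Python) =====
-- from typing import List, Set
--
-- def parse_paragraphs(lines: List[str]) -> List[Set[str]]:
--     parsed_paragraphs = []
--     current_paragraph = set()
--     for line in lines:
--         if line:
--             current_paragraph = current_paragraph.union(set(line))
--         else:
--             parsed_paragraphs.append(current_paragraph)
--             current_paragraph = set()
--     parsed_paragraphs.append(current_paragraph)
--     return parsed_paragraphs
-- ===== SOURCE B (Python) =====
-- def parse_paragraphs(lines):
--     # Recursive split: take the run of non-empty lines, union its characters,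
--     # then recurse past the first empty line.
--     i = 0
--     while i < len(lines) and lines[i]:
--         i += 1
--     paragraph = set()
--     for line in lines[:i]:
--         paragraph.update(line)
--     if i == len(lines):
--         return [paragraph]
--     return [paragraph] + parse_paragraphs(lines[i + 1:])
-- ===== Notes on version B (the rewrite author's own statement) =====
-- stated objective: alternative
-- what changed: Replaced the single-pass accumulate-and-flush loop (mutable current set flushed at each empty line) with a recursive split: find the run of non-empty lines, build its character set in one update pass, and recurse past the first empty line.
import Mathlib
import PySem

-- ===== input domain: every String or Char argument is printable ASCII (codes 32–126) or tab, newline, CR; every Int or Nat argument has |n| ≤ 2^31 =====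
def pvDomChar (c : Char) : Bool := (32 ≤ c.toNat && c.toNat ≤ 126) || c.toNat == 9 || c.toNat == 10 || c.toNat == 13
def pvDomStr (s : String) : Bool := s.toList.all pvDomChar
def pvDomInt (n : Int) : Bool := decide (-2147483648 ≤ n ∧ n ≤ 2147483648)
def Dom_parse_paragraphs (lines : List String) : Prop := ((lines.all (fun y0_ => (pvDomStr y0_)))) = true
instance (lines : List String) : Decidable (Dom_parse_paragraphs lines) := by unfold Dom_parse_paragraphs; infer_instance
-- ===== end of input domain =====

-- B replaces A's accumulate-and-flush single pass by a recursive split at the first empty line (alternative decomposition).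

-- set(line): the characters of the line as one-character strings, first occurrences
def pvChars (l : String) : List String := l.toList.map (fun c => String.ofList [c])

-- ===== PORT A =====
-- the body of A's for-loop, as a fold step over the state (parsed_paragraphs, current_paragraph)
def pvStepA (st : List (List String) × PySem.Set String) (line : String) :
    List (List String) × PySem.Set String :=
  if line ≠ "" then
    (st.1, PySem.Set.union st.2 (PySem.Set.ofList (pvChars line)))
  else
    (st.1 ++ [st.2], PySem.Set.empty)

def parse_paragraphs (lines : List String) : List (List String) :=
  let st := lines.foldl pvStepA ([], PySem.Set.empty)
  st.1 ++ [st.2]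

-- ===== PORT B =====
def parse_paragraphs_alt (lines : List String) : List (List String) :=
  -- the run of non-empty lines = takeWhile; the rest starts at the first empty line
  let pre := lines.takeWhile (fun l => l ≠ "")
  let rest := lines.dropWhile (fun l => l ≠ "")
  let paragraph := pre.foldl (fun (s : PySem.Set String) l => PySem.Set.update s (pvChars l)) PySem.Set.empty
  if hr : rest = [] then [paragraph]
  else paragraph :: parse_paragraphs_alt rest.tail
termination_by lines.length
decreasing_by
  have h1 : (lines.dropWhile (fun l => l ≠ "")).length ≤ lines.length :=
    List.length_dropWhile_le _ _
  have h2 : (lines.dropWhile (fun l => l ≠ "")).tail.length <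
      (lines.dropWhile (fun l => l ≠ "")).length := by
    cases hc : lines.dropWhile (fun l => l ≠ "") with
    | nil => exact absurd hc hr
    | cons a b => simp
  omega

-- ===== PRECONDITION & SPEC =====
def Spec_parse_paragraphs (lines : List String) (out : List (List String)) : Prop := out = parse_paragraphs_alt lines
instance (lines : List String) (out : List (List String)) : Decidable (Spec_parse_paragraphs lines out) := by unfold Spec_parse_paragraphs; infer_instance

-- ===== CLAIM (what is proved, stated in full; the proofs are below) =====
def Claim_equal_parse_paragraphs : Prop := ∀ (lines : List String), Dom_parse_paragraphs lines → Spec_parse_paragraphs lines (parse_paragraphs lines)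

-- ===== LEMMAS AND PROOFS =====

-- merging a fold-in-progress current paragraph into B's first paragraph
def pvCons (cur : PySem.Set String) (ps : List (List String)) : List (List String) :=
  match ps with
  | [] => [cur]
  | p :: t => PySem.Set.update cur p :: t

theorem pv_union_eq_update (s t : PySem.Set String) :
    PySem.Set.union s t = PySem.Set.update s t := rfl

theorem pv_update_ofList {α : Type} [BEq α] [LawfulBEq α] (s : PySem.Set α) (xs : List α) :
    PySem.Set.update s (PySem.Set.ofList xs) = PySem.Set.update s xs := by
  rw [PySem.Set.update_eq_append_filter, PySem.Set.update_eq_append_filter,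
    PySem.Set.ofList_ofList]

theorem pv_update_update {α : Type} [BEq α] [LawfulBEq α] (s : PySem.Set α) (xs p : List α) :
    PySem.Set.update s (PySem.Set.update (PySem.Set.ofList xs) p) =
      PySem.Set.update (PySem.Set.update s xs) p := by
  have h1 : PySem.Set.update (PySem.Set.ofList xs) p = PySem.Set.ofList (xs ++ p) := by
    rw [← PySem.Set.update_nil_left, ← PySem.Set.update_append, ← PySem.Set.update_nil_left]
  rw [h1, pv_update_ofList, PySem.Set.update_append]

-- folding update over a list of lines is one update with the concatenated characters
theorem pv_foldl_update : ∀ (css : List String) (s : PySem.Set String),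
    css.foldl (fun st l => PySem.Set.update st (pvChars l)) s =
      PySem.Set.update s (css.flatMap pvChars) := by
  intro css
  induction css with
  | nil => intro s; simp [PySem.Set.update]
  | cons c cs ih =>
      intro s
      simp only [List.foldl_cons, List.flatMap_cons, ih, PySem.Set.update_append]

theorem pv_update_nil_left {α : Type} [BEq α] (xs : List α) :
    PySem.Set.update ([] : PySem.Set α) xs = PySem.Set.ofList xs := rfl

-- updating a deduplicated prefix appends and deduplicates
-- B's first paragraph is the deduplicated characters of the leading non-empty run
theorem pv_alt_shape (lines : List String) :
    parse_paragraphs_alt lines =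
      PySem.Set.ofList ((lines.takeWhile (fun l => l ≠ "")).flatMap pvChars) ::
        (parse_paragraphs_alt lines).tail := by
  rw [parse_paragraphs_alt.eq_def]
  simp only [pv_foldl_update, pv_update_nil_left]
  split <;> simp [pv_update_nil_left]

theorem pv_cons_empty (lines : List String) :
    pvCons PySem.Set.empty (parse_paragraphs_alt lines) = parse_paragraphs_alt lines := by
  rw [pv_alt_shape]
  simp only [pvCons, PySem.Set.update_empty, PySem.Set.ofList_ofList]

theorem pv_alt_cons_empty (ls : List String) :
    parse_paragraphs_alt ("" :: ls) = PySem.Set.empty :: parse_paragraphs_alt ls := by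
  rw [parse_paragraphs_alt.eq_def]
  simp

theorem pv_alt_cons_ne (l : String) (ls : List String) (h : l ≠ "") :
    parse_paragraphs_alt (l :: ls) =
      PySem.Set.update (PySem.Set.ofList (pvChars l)) ((parse_paragraphs_alt ls).headI) ::
        (parse_paragraphs_alt ls).tail := by
  conv_lhs => rw [parse_paragraphs_alt.eq_def]
  conv_rhs => rw [parse_paragraphs_alt.eq_def]
  simp only [List.takeWhile_cons, List.dropWhile_cons, h, ne_eq, not_false_eq_true,
    decide_true, if_true, pv_foldl_update, pv_update_nil_left, List.flatMap_cons]
  split <;> rename_i h' <;>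
    simp [h', List.headI, List.tail, pv_update_ofList, pv_update_nil_left,
      PySem.Set.ofList_append]

-- the loop invariant: A's fold from (acc, cur) produces acc ++ (B's paragraphs with cur merged into the first)
theorem pv_main : ∀ (lines : List String) (acc : List (List String)) (cur : PySem.Set String),
    (lines.foldl pvStepA (acc, cur)).1 ++ [(lines.foldl pvStepA (acc, cur)).2] =
      acc ++ pvCons cur (parse_paragraphs_alt lines) := by
  intro lines
  induction lines with
  | nil =>
      intro acc cur
      rw [parse_paragraphs_alt.eq_def]
      simp [pvCons, PySem.Set.update_nil]
  | cons l ls ih =>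
      intro acc cur
      by_cases h : l = ""
      · subst h
        rw [pv_alt_cons_empty]
        simp only [List.foldl_cons, pvStepA]
        simp only [ne_eq, not_true_eq_false, if_false]
        rw [ih, pv_cons_empty]
        simp [pvCons, PySem.Set.update_nil]
      · rw [pv_alt_cons_ne l ls h]
        simp only [List.foldl_cons, pvStepA, if_pos h]
        rw [ih]
        rw [pv_alt_shape ls]
        simp only [pvCons, pv_union_eq_update, pv_update_ofList, pv_update_update,
          List.headI, List.tail]

-- ===== VERDICT (by name: the statement is the Claim_ definition above) =====
theorem parse_paragraphs_spec : Claim_equal_parse_paragraphs := by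
  intro lines _
  unfold Spec_parse_paragraphs parse_paragraphs
  exact (pv_main lines [] PySem.Set.empty).trans (pv_cons_empty lines)
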